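-- pv_equiv track=rewrite | github.com/ejaj/Data-Structures | stack/waiter.py | waiter
-- ===== SOURCE A (Python) =====
-- def waiter(number, q):
--
--     primegen = [1] * 10000
--     prime = []
--     for i in range(2, 10000):
--         if primegen[i] == 1:
--             for j in range(i,10000,i):
--                 primegen[j] = 0
--             prime.append(i)
--     a = [[] for i in range(q+1)]
--     b = [[] for i in range(q+1)]
--     a[0] = number
--
--     for i in range(q):
--         while a[i]:
--             plate = a[i].pop()
--             if plate%prime[i] == 0:
--                 b[i+1].append(plate)
--             else:
--                 a[i+1].append(plate)
--     result = []
--     for i in range(q+1):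
--         while b[i]:
--             result.append(b[i].pop())
--     for i in range(q+1):
--         while a[i]:
--             result.append(a[i].pop())
--     return result
-- ===== SOURCE B (Python) =====
-- def waiter(number, q):
--     # Same sieve as the original to get the primes below 10000.
--     primegen = [1] * 10000
--     prime = []
--     for i in range(2, 10000):
--         if primegen[i] == 1:
--             for j in range(i, 10000, i):
--                 primegen[j] = 0
--             prime.append(i)
--     qp = prime[:q]
--     answered = [[] for _ in qp]
--     unanswered = []
--     # One plate-major pass: each plate exits at the first of the q primes dividing it.
--     for x in number:
--         for k, p in enumerate(qp):
--             if x % p == 0: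
--                 answered[k].append(x)
--                 break
--         else:
--             unanswered.append(x)
--     result = []
--     for k, bucket in enumerate(answered):
--         result.extend(bucket if k % 2 == 0 else reversed(bucket))
--     result.extend(reversed(unanswered) if q % 2 == 0 else unanswered)
--     return result
-- ===== Notes on version B (the rewrite author's own statement) =====
-- stated objective: alternative
-- what changed: A runs q rounds, each popping and re-stacking the surviving plates; B makes one plate-major pass that finds each plate's first dividing prime among the first q primes, buckets plates by that exit round, and emits the buckets with an even/odd parity reversal (unanswered plates with the opposite parity of q).
import Mathlib
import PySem

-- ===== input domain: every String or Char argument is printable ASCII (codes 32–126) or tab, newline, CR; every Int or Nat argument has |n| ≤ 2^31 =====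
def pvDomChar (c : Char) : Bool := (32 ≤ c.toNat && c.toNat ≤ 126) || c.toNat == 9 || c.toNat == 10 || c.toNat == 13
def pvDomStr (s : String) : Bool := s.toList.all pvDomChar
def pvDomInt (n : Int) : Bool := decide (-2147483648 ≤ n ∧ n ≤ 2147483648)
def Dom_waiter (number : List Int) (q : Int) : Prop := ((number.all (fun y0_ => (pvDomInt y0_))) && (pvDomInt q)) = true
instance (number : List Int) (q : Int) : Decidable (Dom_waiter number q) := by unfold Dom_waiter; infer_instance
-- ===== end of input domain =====

-- B re-implements A's q rounds of stack re-scanning as one plate-major pass (each plate's exit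
-- round is the first of the q primes dividing it) plus a parity-reversed emission; equivalence is
-- about the RETURN value only (the Python A empties the caller's `number` list in place, B does not).

-- ===== PORT A =====
-- sieve of Eratosthenes over 10000 flags, shared verbatim by A and B (both Python sources
-- contain this exact sieve).  `primegen` is the Python list of 10000 ints (an Array here).
-- for j in range(i,10000,i): primegen[j] = 0   — range(i,10000,i) = List.range' i (9999/i) i; exact
def pvMark (pg : Array Int) (i : Nat) : Array Int :=
  (List.range' i (9999 / i) i).foldl (fun pg j => pg.setIfInBounds j 0) pg

def pvSieveStep (st : Array Int × List Int) (i : Nat) : Array Int × List Int :=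
  if st.1.getD i 0 == 1 then (pvMark st.1 i, st.2 ++ [(i : Int)]) else st

-- for i in range(2,10000): … (iterates over non-negative ints only, so a Nat range; exact)
def pvSieve : Array Int × List Int :=
  (List.range' 2 9998).foldl pvSieveStep (Array.replicate 10000 (1 : Int), [])

-- `prime` is the second component of the final sieve state (a named accessor keeps the
-- kernel from evaluating the sieve when this definition is unfolded in proofs)
def pvPrimeAux (st : Array Int × List Int) : List Int := st.2

def pvPrime : List Int := pvPrimeAux pvSieve

-- while a[i]: plate = a[i].pop(); …  — popping from the end = a left fold over the reversed
-- list; returns (b[i+1], a[i+1]), both built by append exactly as the Python does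
def pvRound (p : Int) (stack : List Int) : List Int × List Int :=
  stack.reverse.foldl
    (fun (st : List Int × List Int) plate =>
      if PySem.Int.mod plate p == 0 then (st.1 ++ [plate], st.2) else (st.1, st.2 ++ [plate]))
    ([], [])

-- for i in range(q): one round per prime; `none` = the IndexError `prime[i]` raises when the
-- primes run out while the current stack is still non-empty (Python touches prime[i] only then)
def pvRoundsA (prime : List Int) : Nat → Nat → List Int → List (List Int) →
    Option (List Int × List (List Int))
  | 0, _, a, bs => some (a, bs)
  | n + 1, i, a, bs =>
    match a with
    | [] => pvRoundsA prime n (i + 1) [] (bs ++ [[]])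
    | _ :: _ =>
      match PySem.List.pyGet? prime (i : Int) with
      | none => none
      | some p =>
        let r := pvRound p a
        pvRoundsA prime n (i + 1) r.2 (bs ++ [r.1])

def waiter (number : List Int) (q : Int) : List Int :=
  if q < 0 then []  -- a = [[] for i in range(q+1)] is empty, so a[0] = number raises; outside Pre_
  else
    match pvRoundsA pvPrime q.toNat 0 number [] with
    | none => []    -- IndexError from prime[i]; outside Pre_
    | some (a, bs) =>
      -- result pops every b[i] then every a[i]: b[0] is always empty, bs holds b[1..q],
      -- a[0..q-1] were emptied by their rounds and a[q] is `a`; popping a stack reverses it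
      (bs.foldl (fun r bi => r ++ bi.reverse) []) ++ a.reverse

-- ===== PORT B =====
-- for k, p in enumerate(qp): if x % p == 0: … break / else: … — first index k with qp[k] ∣ x
def pvFirstDiv (x : Int) : List Int → Nat → Option Nat
  | [], _ => none
  | p :: ps, k => if PySem.Int.mod x p == 0 then some k else pvFirstDiv x ps (k + 1)

-- the plate-major pass: answered = [[] for _ in qp]; unanswered = []
def pvClassify (qp : List Int) (number : List Int) : List (List Int) × List Int :=
  number.foldl
    (fun (st : List (List Int) × List Int) x =>
      match pvFirstDiv x qp 0 with
      | some k => (st.1.modify k (· ++ [x]), st.2)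
      | none => (st.1, st.2 ++ [x]))
    (List.replicate qp.length [], [])

def waiter_alt (number : List Int) (q : Int) : List Int :=
  let qp := PySem.List.slice pvPrime none (some q)   -- prime[:q]
  let st := pvClassify qp number
  let r1 := (PySem.List.enumerate st.1).foldl
    (fun r kb => r ++ (if PySem.Int.mod kb.1 2 == 0 then kb.2 else kb.2.reverse)) []
  r1 ++ (if PySem.Int.mod q 2 == 0 then st.2.reverse else st.2)

-- ===== PRECONDITION & SPEC =====
-- Pre_ excludes exactly the inputs where the Python A raises IndexError: q < 0 (assigning a[0]
-- in an empty list of stacks), and q ≥ 1230 when some plate has no divisor in range(2,10000)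
-- (that plate survives all 1229 primes and round 1229 reads past the end of `prime`).
def Pre_waiter (number : List Int) (q : Int) : Prop :=
  0 ≤ q ∧ (q ≤ 1229 ∨ ∀ x ∈ number, ∃ d ∈ PySem.List.pyRange 2 10000 1, PySem.Int.mod x d = 0)
instance (number : List Int) (q : Int) : Decidable (Pre_waiter number q) := by
  unfold Pre_waiter; infer_instance

def pvWitness_waiter : List Int × Int := ([3, 10, 7], 2)

def Spec_waiter (number : List Int) (q : Int) (out : List Int) : Prop := out = waiter_alt number q
instance (number : List Int) (q : Int) (out : List Int) : Decidable (Spec_waiter number q out) := by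
  unfold Spec_waiter; infer_instance

-- ===== CLAIM (what is proved, stated in full; the proofs are below) =====
def Claim_equal_waiter : Prop := ∀ (number : List Int) (q : Int),
  Dom_waiter number q → Pre_waiter number q → Spec_waiter number q (waiter number q)

-- ===== LEMMAS AND PROOFS =====

-- ---- Part 1: what the sieve computes ----

-- cheap primality test used only in proofs (trial division below 100 decides n < 10000)
def pvIsPrime (n : Nat) : Bool := 2 ≤ n && (List.range' 2 98).all (fun d => d == n || !(n % d == 0))

theorem pvIsPrime_iff {n : Nat} (hn : n < 10000) : pvIsPrime n = true ↔ n.Prime := by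
  unfold pvIsPrime
  simp only [Bool.and_eq_true, decide_eq_true_eq, List.all_eq_true, List.mem_range'_1,
    Bool.or_eq_true, beq_iff_eq, Bool.not_eq_eq_eq_not, Bool.not_true, beq_eq_false_iff_ne,
    ne_eq]
  constructor
  · rintro ⟨h2, hall⟩
    by_contra hnp
    have hpos : 0 < n := by omega
    have hf := Nat.minFac_prime (n := n) (by omega)
    have hdvd := Nat.minFac_dvd n
    have hsq := Nat.minFac_sq_le_self hpos hnp
    have h2f : 2 ≤ n.minFac := hf.two_le
    have hlt : n.minFac < 100 := by nlinarith [hsq]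
    have hne : n.minFac ≠ n := by
      intro he
      exact hnp (Nat.prime_def_minFac.mpr ⟨h2, he⟩)
    rcases hall n.minFac ⟨h2f, by omega⟩ with h | h
    · exact hne h
    · exact h (Nat.mod_eq_zero_of_dvd hdvd)
  · intro hp
    refine ⟨hp.two_le, fun d hd => ?_⟩
    by_cases hdn : d = n
    · exact Or.inl hdn
    · refine Or.inr (fun hmod => ?_)
      have : d ∣ n := Nat.dvd_of_mod_eq_zero hmod
      rcases (Nat.Prime.eq_one_or_self_of_dvd hp d this) with h1 | h2
      · omega
      · exact hdn h2

theorem pvFoldSet (L : List Nat) (pg : Array Int) :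
    ((L.foldl (fun a j => a.setIfInBounds j 0) pg)).size = pg.size ∧
    ∀ m, ((L.foldl (fun a j => a.setIfInBounds j 0) pg))[m]? =
      if m ∈ L ∧ m < pg.size then some 0 else pg[m]? := by
  induction L generalizing pg with
  | nil => simp
  | cons j L ih =>
    simp only [List.foldl_cons]
    rcases ih (pg.setIfInBounds j 0) with ⟨hs, hg⟩
    refine ⟨by simp [hs], fun m => ?_⟩
    rw [hg m]
    simp only [Array.size_setIfInBounds, Array.getElem?_setIfInBounds, List.mem_cons]
    by_cases hms : m < pg.size
    · by_cases hmL : m ∈ L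
      · simp [hmL, hms]
      · by_cases hjm : j = m
        · subst hjm; simp [hmL, hms]
        · simp [hmL, hms, hjm, Ne.symm hjm]
    · have hnone : pg[m]? = none := getElem?_neg _ _ (by omega)
      by_cases hmL : m ∈ L
      · by_cases hjm : j = m
        · subst hjm; simp [hmL, hms, hnone]
        · simp [hmL, hms, hjm, hnone]
      · by_cases hjm : j = m
        · subst hjm; simp [hmL, hms, hnone]
        · simp [hmL, hms, hjm, hnone]

theorem pvMemMarkRange {i m : Nat} (h2 : 2 ≤ i) :
    (m ∈ List.range' i (9999 / i) i) ↔ (i ∣ m ∧ i ≤ m ∧ m < 10000) := by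
  rw [List.mem_range']
  constructor
  · rintro ⟨k, hk, rfl⟩
    have hk1 : k + 1 ≤ 9999 / i := hk
    have hmul : (k + 1) * i ≤ 9999 := (Nat.le_div_iff_mul_le (by omega)).mp hk1
    have he : i + i * k = i * (k + 1) := by ring
    refine ⟨⟨k + 1, he⟩, by omega, by nlinarith⟩
  · rintro ⟨⟨t, rfl⟩, him, hlt⟩
    cases t with
    | zero => simp at him; omega
    | succ t' =>
      refine ⟨t', ?_, by ring⟩
      have hmul : (t' + 1) * i ≤ 9999 := by nlinarith
      have := (Nat.le_div_iff_mul_le (x := t' + 1) (y := 9999) (k := i) (by omega)).mpr hmul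
      omega

theorem pvMark_spec {pg : Array Int} (hs : pg.size = 10000) {i : Nat} (h2 : 2 ≤ i) :
    (pvMark pg i).size = 10000 ∧
    ∀ m, (pvMark pg i)[m]? = if i ∣ m ∧ i ≤ m ∧ m < 10000 then some 0 else pg[m]? := by
  unfold pvMark
  rcases pvFoldSet (List.range' i (9999 / i) i) pg with ⟨h1, h2'⟩
  refine ⟨by rw [h1, hs], fun m => ?_⟩
  rw [h2' m, hs]
  by_cases hm : i ∣ m ∧ i ≤ m ∧ m < 10000
  · simp [hm, (pvMemMarkRange h2).mpr hm]
  · have : ¬ m ∈ List.range' i (9999 / i) i := fun hc => hm ((pvMemMarkRange h2).mp hc)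
    simp [hm, this]

theorem pvPrimeChar {i : Nat} (h2 : 2 ≤ i) :
    (∀ p : Nat, p.Prime → p < i → ¬ p ∣ i) ↔ i.Prime := by
  constructor
  · intro h
    by_contra hnp
    have hf := Nat.minFac_prime (n := i) (by omega)
    have hne : i.minFac ≠ i := fun he => hnp (Nat.prime_def_minFac.mpr ⟨h2, he⟩)
    have hle : i.minFac ≤ i := Nat.minFac_le (by omega)
    exact h i.minFac hf (by omega) (Nat.minFac_dvd i)
  · intro hp p hpp hlt hdvd
    rcases hp.eq_one_or_self_of_dvd p hdvd with h | h
    · exact hpp.one_lt.ne' h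
    · omega

def pvState (c : Nat) : Array Int × List Int :=
  (List.range' 2 c).foldl pvSieveStep (Array.replicate 10000 (1 : Int), [])

theorem pvState_inv : ∀ c, c ≤ 9998 →
    (pvState c).1.size = 10000 ∧
    (∀ m, 2 ≤ m → m < 10000 →
      ((pvState c).1[m]? = some 1 ↔ ∀ p : Nat, p.Prime → p < 2 + c → ¬ p ∣ m)) ∧
    pvPrimeAux (pvState c) = List.map Int.ofNat ((List.range' 2 c).filter (fun n => pvIsPrime n)) := by
  intro c
  induction c with
  | zero =>
    intro _
    refine ⟨by simp [pvState], fun m h2 hlt => ?_, by simp [pvState, pvPrimeAux]⟩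
    have hcell : (pvState 0).1[m]? = some 1 := by
      simp [pvState, Array.getElem?_replicate, hlt]
    rw [hcell]
    constructor
    · intro _ p hp hlt2 _
      have := hp.two_le; omega
    · intro _; rfl
  | succ c ih =>
    intro hc
    rcases ih (by omega) with ⟨hsz, hget, hlist⟩
    have hstep : pvState (c + 1) = pvSieveStep (pvState c) (2 + c) := by
      simp [pvState, List.range'_concat, List.foldl_append]
    have hifull : 2 + c < 10000 := by omega
    have hv : (pvState c).1[(2 + c)]? = some ((pvState c).1[(2 + c)]'(by omega)) :=
      Array.getElem?_eq_getElem (by omega)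
    have hiff := hget (2 + c) (by omega) hifull
    have hchar := pvPrimeChar (i := 2 + c) (by omega)
    have hfilt : (List.range' 2 (c + 1)).filter (fun n => pvIsPrime n)
        = (List.range' 2 c).filter (fun n => pvIsPrime n)
          ++ if pvIsPrime (2 + c) then [2 + c] else [] := by
      rw [List.range'_concat, List.filter_append]
      simp [List.filter_cons, Nat.one_mul]
    by_cases hp : (2 + c).Prime
    · -- primegen[2+c] is still 1: clear its multiples and append it to the prime list
      have hone : (pvState c).1[(2 + c)]? = some 1 := by
        rw [hiff]; exact fun p a b c => hchar.mpr hp p a b c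
      have hcond : ((pvState c).1.getD (2 + c) 0 == 1) = true := by
        rw [Array.getD_eq_getD_getElem?, hone]; rfl
      rcases pvMark_spec (pg := (pvState c).1) hsz (i := 2 + c) (by omega) with ⟨hms, hmg⟩
      rw [hstep]
      unfold pvSieveStep
      rw [hcond]
      simp only [if_true]
      refine ⟨hms, fun m h2 hlt => ?_, ?_⟩
      · rw [hmg m]
        by_cases hdm : (2 + c) ∣ m ∧ 2 + c ≤ m ∧ m < 10000
        · simp only [hdm, if_true]
          constructor
          · intro h; exact absurd h (by simp)
          · intro h
            exact absurd (h (2 + c) hp (by omega) hdm.1) (by simp)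
        · simp only [hdm, if_false]
          rw [hget m h2 hlt]
          constructor
          · intro h p hpp hplt hpd
            rcases Nat.lt_or_ge p (2 + c) with h' | h'
            · exact h p hpp h' hpd
            · have hpe : p = 2 + c := by omega
              subst hpe
              have := Nat.le_of_dvd (by omega) hpd
              exact absurd ⟨hpd, by omega, hlt⟩ hdm
          · intro h p hpp hplt hpd
            exact h p hpp (by omega) hpd
      · simp only [pvPrimeAux] at hlist ⊢
        rw [hlist, hfilt]
        have hptrue : pvIsPrime (2 + c) = true := (pvIsPrime_iff hifull).mpr hp
        simp [hptrue]
    · -- primegen[2+c] was already cleared by a smaller prime factor: skip it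
      have hnone1 : (pvState c).1[(2 + c)]? ≠ some 1 := fun h => hp (hchar.mp (hiff.mp h))
      have hcond : ((pvState c).1.getD (2 + c) 0 == 1) = false := by
        rw [Array.getD_eq_getD_getElem?, hv]
        simp only [Option.getD_some, beq_eq_false_iff_ne, ne_eq]
        intro he
        exact hnone1 (by rw [hv, he])
      rw [hstep]
      unfold pvSieveStep
      rw [hcond]
      simp only [Bool.false_eq_true, if_false]
      refine ⟨hsz, fun m h2 hlt => ?_, ?_⟩
      · rw [hget m h2 hlt]
        constructor
        · intro h p hpp hplt hpd
          rcases Nat.lt_or_ge p (2 + c) with h' | h'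
          · exact h p hpp h' hpd
          · have hpe : p = 2 + c := by omega
            exact absurd (hpe ▸ hpp) hp
        · intro h p hpp hplt hpd
          exact h p hpp (by omega) hpd
      · simp only [pvPrimeAux] at hlist ⊢
        rw [hlist, hfilt]
        have hpfalse : pvIsPrime (2 + c) = false := by
          rw [← Bool.not_eq_true, pvIsPrime_iff hifull]
          exact hp
        simp [hpfalse]

theorem pvSieve_eq_state : pvSieve = pvState 9998 := rfl

theorem pvPrime_eq :
    pvPrime = List.map Int.ofNat ((List.range' 2 9998).filter (fun n => pvIsPrime n)) := by
  have h := (pvState_inv 9998 (by omega)).2.2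
  rw [← pvSieve_eq_state] at h
  exact h

set_option maxRecDepth 20000 in
theorem pvChunk0 : ((List.range' 2 1000).filter (fun n => pvIsPrime n)).length = 168 := by decide
set_option maxRecDepth 20000 in
theorem pvChunk1 : ((List.range' 1002 1000).filter (fun n => pvIsPrime n)).length = 135 := by decide
set_option maxRecDepth 20000 in
theorem pvChunk2 : ((List.range' 2002 1000).filter (fun n => pvIsPrime n)).length = 128 := by decide
set_option maxRecDepth 20000 in
theorem pvChunk3 : ((List.range' 3002 1000).filter (fun n => pvIsPrime n)).length = 120 := by decide
set_option maxRecDepth 20000 in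
theorem pvChunk4 : ((List.range' 4002 1000).filter (fun n => pvIsPrime n)).length = 118 := by decide
set_option maxRecDepth 20000 in
theorem pvChunk5 : ((List.range' 5002 1000).filter (fun n => pvIsPrime n)).length = 114 := by decide
set_option maxRecDepth 20000 in
theorem pvChunk6 : ((List.range' 6002 1000).filter (fun n => pvIsPrime n)).length = 118 := by decide
set_option maxRecDepth 20000 in
theorem pvChunk7 : ((List.range' 7002 1000).filter (fun n => pvIsPrime n)).length = 106 := by decide
set_option maxRecDepth 20000 in
theorem pvChunk8 : ((List.range' 8002 1000).filter (fun n => pvIsPrime n)).length = 111 := by decide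
set_option maxRecDepth 20000 in
theorem pvChunk9 : ((List.range' 9002 998).filter (fun n => pvIsPrime n)).length = 111 := by decide

theorem pvPrimeCount : ((List.range' 2 9998).filter (fun n => pvIsPrime n)).length = 1229 := by
  have e0 : List.range' 2 9998 = List.range' 2 1000 ++ List.range' 1002 8998 := by
    have h := @List.range'_append 2 1000 8998 1
    simpa using h.symm
  have e1 : List.range' 1002 8998 = List.range' 1002 1000 ++ List.range' 2002 7998 := by
    have h := @List.range'_append 1002 1000 7998 1
    simpa using h.symm
  have e2 : List.range' 2002 7998 = List.range' 2002 1000 ++ List.range' 3002 6998 := by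
    have h := @List.range'_append 2002 1000 6998 1
    simpa using h.symm
  have e3 : List.range' 3002 6998 = List.range' 3002 1000 ++ List.range' 4002 5998 := by
    have h := @List.range'_append 3002 1000 5998 1
    simpa using h.symm
  have e4 : List.range' 4002 5998 = List.range' 4002 1000 ++ List.range' 5002 4998 := by
    have h := @List.range'_append 4002 1000 4998 1
    simpa using h.symm
  have e5 : List.range' 5002 4998 = List.range' 5002 1000 ++ List.range' 6002 3998 := by
    have h := @List.range'_append 5002 1000 3998 1
    simpa using h.symm
  have e6 : List.range' 6002 3998 = List.range' 6002 1000 ++ List.range' 7002 2998 := by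
    have h := @List.range'_append 6002 1000 2998 1
    simpa using h.symm
  have e7 : List.range' 7002 2998 = List.range' 7002 1000 ++ List.range' 8002 1998 := by
    have h := @List.range'_append 7002 1000 1998 1
    simpa using h.symm
  have e8 : List.range' 8002 1998 = List.range' 8002 1000 ++ List.range' 9002 998 := by
    have h := @List.range'_append 8002 1000 998 1
    simpa using h.symm
  rw [e0, List.filter_append, List.length_append, pvChunk0,
      e1, List.filter_append, List.length_append, pvChunk1,
      e2, List.filter_append, List.length_append, pvChunk2,
      e3, List.filter_append, List.length_append, pvChunk3,
      e4, List.filter_append, List.length_append, pvChunk4,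
      e5, List.filter_append, List.length_append, pvChunk5,
      e6, List.filter_append, List.length_append, pvChunk6,
      e7, List.filter_append, List.length_append, pvChunk7,
      e8, List.filter_append, List.length_append, pvChunk8,
      pvChunk9]

theorem pvPrime_length : pvPrime.length = 1229 := by
  rw [pvPrime_eq, List.length_map, pvPrimeCount]

theorem pvPrime_mem {p : Nat} (hp : p.Prime) (hlt : p < 10000) : (p : Int) ∈ pvPrime := by
  rw [pvPrime_eq]
  have hm : p ∈ (List.range' 2 9998).filter (fun n => pvIsPrime n) := by
    rw [List.mem_filter]
    exact ⟨List.mem_range'_1.mpr ⟨hp.two_le, by omega⟩, (pvIsPrime_iff hlt).mpr hp⟩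
  have := List.mem_map_of_mem (f := Int.ofNat) hm
  simpa [Int.ofNat_eq_natCast] using this

theorem pvSmoothHit {x d : Int} (h2 : 2 ≤ d) (hlt : d < 10000) (hdvd : d ∣ x) :
    ∃ k, k < pvPrime.length ∧ pvPrime.getD k 1 ∣ x := by
  set dn := d.toNat with hdn
  have hdn2 : 2 ≤ dn := by omega
  have hp := Nat.minFac_prime (n := dn) (by omega)
  have hple : dn.minFac ≤ dn := Nat.minFac_le (by omega)
  have hplt : dn.minFac < 10000 := by omega
  have hmem : ((dn.minFac : Nat) : Int) ∈ pvPrime := pvPrime_mem hp hplt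
  rcases List.mem_iff_getElem.mp hmem with ⟨k, hk, hke⟩
  refine ⟨k, hk, ?_⟩
  rw [List.getD_eq_getElem _ _ hk, hke]
  have h1 : ((dn.minFac : Nat) : Int) ∣ (dn : Int) := Int.natCast_dvd_natCast.mpr (Nat.minFac_dvd dn)
  have h2' : (dn : Int) = d := by omega
  exact dvd_trans (h2' ▸ h1) hdvd

-- ---- Part 2: what A's rounds compute ----

-- reversal parity: the contents of a stack after n pop-everything passes
def pvPw (n : Nat) (l : List Int) : List Int := if n % 2 = 0 then l else l.reverse

theorem pvPw_nil (n : Nat) : pvPw n [] = [] := by unfold pvPw; split <;> simp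

theorem pvPw_one (l : List Int) : pvPw 1 l = l.reverse := by simp [pvPw]

theorem pvPw_reverse (n : Nat) (l : List Int) : pvPw n l.reverse = pvPw (n + 1) l := by
  by_cases h : n % 2 = 0
  · have h2 : ¬ ((n + 1) % 2 = 0) := by omega
    simp [pvPw, h, h2]
  · have h2 : (n + 1) % 2 = 0 := by omega
    simp [pvPw, h, h2]

theorem pvPw_rev2 (n : Nat) (l : List Int) : (pvPw n l).reverse = pvPw (n + 1) l := by
  by_cases h : n % 2 = 0
  · have h2 : ¬ ((n + 1) % 2 = 0) := by omega
    simp [pvPw, h, h2]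
  · have h2 : (n + 1) % 2 = 0 := by omega
    simp [pvPw, h, h2]

theorem pvPw_two (n : Nat) (l : List Int) : pvPw (n + 2) l = pvPw n l := by
  simp [pvPw, Nat.add_mod]

def pvDvdAt (P : List Int) (k : Nat) (x : Int) : Bool := PySem.Int.mod x (P.getD k 1) == 0
def pvNoHit (P : List Int) (i n : Nat) (x : Int) : Bool :=
  (List.range n).all (fun j => !pvDvdAt P (i + j) x)
def pvHitAt (P : List Int) (i j : Nat) (x : Int) : Bool :=
  pvNoHit P i j x && pvDvdAt P (i + j) x

theorem pvNoHit_zero (P : List Int) (i : Nat) (x : Int) : pvNoHit P i 0 x = true := by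
  simp [pvNoHit]

theorem pvNoHit_succ (P : List Int) (i n : Nat) (x : Int) :
    pvNoHit P i (n + 1) x = ((!pvDvdAt P i x) && pvNoHit P (i + 1) n x) := by
  unfold pvNoHit
  rw [List.range_succ_eq_map, List.all_cons, List.all_map]
  have hc : ((fun j => !pvDvdAt P (i + j) x) ∘ Nat.succ) = (fun j => !pvDvdAt P (i + 1 + j) x) := by
    funext j
    simp only [Function.comp_apply]
    have he : i + j.succ = i + 1 + j := by omega
    rw [he]
  rw [hc]
  simp

theorem pvHitAt_zero (P : List Int) (i : Nat) (x : Int) : pvHitAt P i 0 x = pvDvdAt P i x := by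
  simp [pvHitAt, pvNoHit_zero]

theorem pvHitAt_succ (P : List Int) (i j : Nat) (x : Int) :
    pvHitAt P i (j + 1) x = ((!pvDvdAt P i x) && pvHitAt P (i + 1) j x) := by
  unfold pvHitAt
  rw [pvNoHit_succ, Bool.and_assoc]
  have : i + (j + 1) = (i + 1) + j := by omega
  rw [this]

theorem pvRoundAux (p : Int) (l : List Int) : ∀ b a : List Int,
    l.foldl (fun (st : List Int × List Int) plate =>
        if PySem.Int.mod plate p == 0 then (st.1 ++ [plate], st.2) else (st.1, st.2 ++ [plate]))
      (b, a)
    = (b ++ l.filter (fun x => PySem.Int.mod x p == 0),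
       a ++ l.filter (fun x => !(PySem.Int.mod x p == 0))) := by
  induction l with
  | nil => simp
  | cons x l ih =>
    intro b a
    simp only [List.foldl_cons]
    by_cases h : (PySem.Int.mod x p == 0) = true
    · rw [if_pos h, ih, List.filter_cons, List.filter_cons]
      simp [h]
    · rw [if_neg h, ih, List.filter_cons, List.filter_cons]
      simp [h]

theorem pvRound_spec (p : Int) (stack : List Int) :
    pvRound p stack
      = (stack.reverse.filter (fun x => PySem.Int.mod x p == 0),
         stack.reverse.filter (fun x => !(PySem.Int.mod x p == 0))) := by
  unfold pvRound
  simpa using pvRoundAux p stack.reverse [] []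

set_option maxRecDepth 4000 in
theorem pvRounds_spec (P : List Int) : ∀ (n i : Nat) (a : List Int) (bs : List (List Int)),
    (n + i ≤ P.length ∨
      ∀ x ∈ a, ∃ k, i ≤ k ∧ k < P.length ∧ P.getD k 1 ∣ x) →
    pvRoundsA P n i a bs =
      some (pvPw n (a.filter (pvNoHit P i n)),
            bs ++ (List.range n).map (fun j => pvPw (j + 1) (a.filter (pvHitAt P i j)))) := by
  intro n
  induction n with
  | zero =>
    intro i a bs _
    have hall : ∀ x ∈ a, pvNoHit P i 0 x = true := fun x _ => pvNoHit_zero P i x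
    simp [pvRoundsA, pvPw, List.filter_eq_self.mpr hall]
  | succ n ih =>
    intro i a bs hcond
    cases a with
    | nil =>
      have hres := ih (i + 1) [] (bs ++ [[]]) (Or.inr (by simp))
      simp only [pvRoundsA, hres]
      congr 2
      · simp [pvPw_nil]
      · rw [List.append_assoc]
        congr 1
        have h1 : ∀ (m : Nat) (f : Nat → List Int), (∀ j, f j = []) →
            List.map f (List.range m) = List.replicate m ([] : List Int) := by
          intro m f hf
          refine List.eq_replicate_iff.mpr ⟨by simp, ?_⟩
          intro b hb
          rcases List.mem_map.mp hb with ⟨j, _, rfl⟩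
          exact hf j
        rw [h1 n _ (fun j => by simp [pvPw_nil]), h1 (n + 1) _ (fun j => by simp [pvPw_nil])]
        simp [List.replicate_succ]
    | cons x0 arest =>
      have hi : i < P.length := by
        rcases hcond with h | h
        · omega
        · rcases h x0 (by simp) with ⟨k, hk1, hk2, _⟩
          omega
      have hget : PySem.List.pyGet? P (i : Int) = some P[i] := by
        rw [PySem.List.pyGet?_natCast]
        exact List.getElem?_eq_getElem hi
      have hgd : P.getD i 1 = P[i] := List.getD_eq_getElem _ _ hi
      have hdv : ∀ x : Int, (PySem.Int.mod x P[i] == 0) = pvDvdAt P i x := by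
        intro x; rw [pvDvdAt, hgd]
      have hside : (n + (i + 1) ≤ P.length ∨
          ∀ x ∈ (x0 :: arest).reverse.filter (fun x => !(PySem.Int.mod x P[i] == 0)),
            ∃ k, i + 1 ≤ k ∧ k < P.length ∧ P.getD k 1 ∣ x) := by
        rcases hcond with h | h
        · exact Or.inl (by omega)
        · refine Or.inr ?_
          intro x hx
          rw [List.mem_filter, List.mem_reverse] at hx
          rcases h x hx.1 with ⟨k, hk1, hk2, hk3⟩
          refine ⟨k, ?_, hk2, hk3⟩
          rcases Nat.lt_or_ge k (i + 1) with h' | h'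
          · exfalso
            have hke : k = i := by omega
            have hm : PySem.Int.mod x P[i] = 0 := by
              rw [PySem.Int.mod_eq_zero_iff_dvd, ← hgd, ← hke]
              exact hk3
            simp [hm] at hx
          · exact h'
      have hres := ih (i + 1)
        ((x0 :: arest).reverse.filter (fun x => !(PySem.Int.mod x P[i] == 0)))
        (bs ++ [(x0 :: arest).reverse.filter (fun x => PySem.Int.mod x P[i] == 0)])
        hside
      simp only [pvRoundsA, hget]
      rw [pvRound_spec, hres]
      congr 2
      · -- surviving stack
        rw [List.filter_filter, List.filter_reverse, pvPw_reverse]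
        congr 1
        apply List.filter_congr
        intro x _
        rw [hdv x, pvNoHit_succ, Bool.and_comm]
      · -- emitted buckets
        rw [List.append_assoc]
        congr 1
        rw [List.range_succ_eq_map, List.map_cons, List.map_map, List.singleton_append]
        congr 1
        · rw [List.filter_reverse, ← pvPw_one]
          congr 1
          apply List.filter_congr
          intro x _
          rw [hdv x, pvHitAt_zero]
        · apply List.map_congr_left
          intro j _
          simp only [Function.comp_apply]
          rw [List.filter_filter, List.filter_reverse, pvPw_reverse]
          congr 1
          apply List.filter_congr
          intro x _
          rw [hdv x, pvHitAt_succ, Bool.and_comm]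

-- ---- Part 3: what B's plate-major pass computes ----

theorem pvFirstDiv_shift (x : Int) : ∀ (l : List Int) (s : Nat),
    pvFirstDiv x l (s + 1) = Option.map (· + 1) (pvFirstDiv x l s) := by
  intro l
  induction l with
  | nil => intro s; simp [pvFirstDiv]
  | cons p ps ih =>
    intro s
    unfold pvFirstDiv
    by_cases h : (PySem.Int.mod x p == 0) = true
    · rw [if_pos h, if_pos h]; rfl
    · rw [if_neg h, if_neg h, ih (s + 1), ih s]

theorem pvDvdAt_cons (p : Int) (ps : List Int) (k : Nat) (x : Int) :
    pvDvdAt (p :: ps) (k + 1) x = pvDvdAt ps k x := by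
  simp [pvDvdAt, List.getD_cons_succ]

theorem pvNoHit_cons (p : Int) (ps : List Int) (i n : Nat) (x : Int) :
    pvNoHit (p :: ps) (i + 1) n x = pvNoHit ps i n x := by
  unfold pvNoHit
  have hc : (fun j => !pvDvdAt (p :: ps) (i + 1 + j) x) = (fun j => !pvDvdAt ps (i + j) x) := by
    funext j
    have he : i + 1 + j = (i + j) + 1 := by omega
    rw [he, pvDvdAt_cons]
  rw [hc]

theorem pvHitAt_cons (p : Int) (ps : List Int) (i j : Nat) (x : Int) :
    pvHitAt (p :: ps) (i + 1) j x = pvHitAt ps i j x := by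
  unfold pvHitAt
  have he : i + 1 + j = (i + j) + 1 := by omega
  rw [pvNoHit_cons, he, pvDvdAt_cons]

theorem pvFirstDiv_some_iff (x : Int) : ∀ (l : List Int) (k : Nat),
    pvFirstDiv x l 0 = some k ↔ (k < l.length ∧ pvHitAt l 0 k x = true) := by
  intro l
  induction l with
  | nil => intro k; simp [pvFirstDiv]
  | cons p ps ih =>
    intro k
    unfold pvFirstDiv
    by_cases h : (PySem.Int.mod x p == 0) = true
    · rw [if_pos h]
      cases k with
      | zero =>
        simp only [List.length_cons]
        constructor
        · intro _
          refine ⟨by omega, ?_⟩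
          rw [pvHitAt_zero]
          simpa [pvDvdAt] using h
        · intro _; simp
      | succ j =>
        simp only [List.length_cons]
        constructor
        · intro hc; exact absurd hc (by simp)
        · rintro ⟨_, hhit⟩
          rw [pvHitAt_succ] at hhit
          have hd : pvDvdAt (p :: ps) 0 x = true := by simpa [pvDvdAt] using h
          rw [hd] at hhit
          simp at hhit
    · rw [if_neg h]
      have hs := pvFirstDiv_shift x ps 0
      rw [show (0 : Nat) + 1 = 1 from rfl] at hs
      rw [hs]
      have hd0 : pvDvdAt (p :: ps) 0 x = false := by
        unfold pvDvdAt
        rw [List.getD_cons_zero]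
        simpa using h
      cases k with
      | zero =>
        constructor
        · intro hc
          rcases hw : pvFirstDiv x ps 0 with _ | a <;> rw [hw] at hc <;> simp at hc
        · rintro ⟨_, hhit⟩
          rw [pvHitAt_zero, hd0] at hhit
          exact absurd hhit (by simp)
      | succ j =>
        rw [show pvHitAt (p :: ps) 0 (j + 1) x
              = ((!pvDvdAt (p :: ps) 0 x) && pvHitAt (p :: ps) (0 + 1) j x)
            from pvHitAt_succ _ 0 j x, pvHitAt_cons, hd0]
        simp only [Bool.not_false, Bool.true_and, List.length_cons, Nat.add_lt_add_iff_right]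
        rw [← ih j]
        rcases hw : pvFirstDiv x ps 0 with _ | a
        · simp
        · simp

theorem pvFirstDiv_none_iff (x : Int) : ∀ (l : List Int),
    pvFirstDiv x l 0 = none ↔ pvNoHit l 0 l.length x = true := by
  intro l
  induction l with
  | nil => simp [pvFirstDiv, pvNoHit_zero]
  | cons p ps ih =>
    unfold pvFirstDiv
    by_cases h : (PySem.Int.mod x p == 0) = true
    · rw [if_pos h]
      have hd0 : pvDvdAt (p :: ps) 0 x = true := by
        unfold pvDvdAt
        rw [List.getD_cons_zero]
        simpa using h
      rw [show (p :: ps).length = ps.length + 1 from rfl, pvNoHit_succ, hd0]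
      simp
    · rw [if_neg h]
      have hs := pvFirstDiv_shift x ps 0
      rw [show (0 : Nat) + 1 = 1 from rfl] at hs
      rw [hs]
      have hd0 : pvDvdAt (p :: ps) 0 x = false := by
        unfold pvDvdAt
        rw [List.getD_cons_zero]
        simpa using h
      rw [show (p :: ps).length = ps.length + 1 from rfl, pvNoHit_succ, hd0]
      rw [pvNoHit_cons]
      simp only [Bool.not_false, Bool.true_and]
      rw [← ih]
      rcases hw : pvFirstDiv x ps 0 with _ | a <;> simp

theorem pvMapGetD (B : List (List Int)) :
    (List.range B.length).map (fun k => B.getD k []) = B := by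
  apply List.ext_getElem (by simp)
  intro i h1 h2
  simp only [List.getElem_map, List.getElem_range, List.getD_eq_getElem?_getD,
    List.getElem?_eq_getElem h2, Option.getD_some]

theorem pvClassifyAux (qp : List Int) : ∀ (l : List Int) (B : List (List Int)) (u : List Int),
    B.length = qp.length →
    l.foldl
      (fun (st : List (List Int) × List Int) x =>
        match pvFirstDiv x qp 0 with
        | some k => (st.1.modify k (· ++ [x]), st.2)
        | none => (st.1, st.2 ++ [x]))
      (B, u)
    = ((List.range B.length).map
         (fun k => B.getD k [] ++ l.filter (fun x => pvFirstDiv x qp 0 == some k)),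
       u ++ l.filter (fun x => (pvFirstDiv x qp 0).isNone)) := by
  intro l
  induction l with
  | nil =>
    intro B u hB
    simp only [List.foldl_nil, List.filter_nil, List.append_nil]
    rw [pvMapGetD]
  | cons x l ih =>
    intro B u hB
    simp only [List.foldl_cons]
    rcases hw : pvFirstDiv x qp 0 with _ | k0
    · simp only [hw]
      rw [ih B (u ++ [x]) hB]
      congr 1
      · apply List.map_congr_left
        intro k _
        rw [List.filter_cons]
        simp [hw]
      · rw [List.filter_cons]
        simp [hw]
    · simp only [hw]
      have hk0 : k0 < qp.length := ((pvFirstDiv_some_iff x qp k0).mp hw).1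
      have hB' : (B.modify k0 (· ++ [x])).length = qp.length := by
        rw [List.length_modify, hB]
      rw [ih (B.modify k0 (· ++ [x])) u hB']
      congr 1
      · simp only [List.length_modify]
        apply List.map_congr_left
        intro k hk
        have hkB : k < B.length := List.mem_range.mp hk
        have hget : (B.modify k0 (· ++ [x])).getD k []
            = if k0 = k then B.getD k [] ++ [x] else B.getD k [] := by
          rw [List.getD_eq_getElem?_getD, List.getElem?_modify, List.getElem?_eq_getElem hkB,
            List.getD_eq_getElem _ _ hkB]
          by_cases hkk : k0 = k <;> simp [hkk]
        by_cases hkk : k0 = k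
        · subst hkk
          rw [hget, if_pos rfl, List.filter_cons]
          simp [hw]
        · rw [hget, if_neg hkk, List.filter_cons]
          simp [hw, hkk]
      · rw [List.filter_cons]
        simp [hw]

theorem pvClassify_spec (qp number : List Int) :
    pvClassify qp number
      = ((List.range qp.length).map
           (fun k => number.filter (fun x => pvFirstDiv x qp 0 == some k)),
         number.filter (fun x => (pvFirstDiv x qp 0).isNone)) := by
  unfold pvClassify
  rw [pvClassifyAux qp number (List.replicate qp.length []) [] (by simp)]
  simp only [List.length_replicate, List.nil_append]
  congr 1
  apply List.map_congr_left
  intro k hk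
  rw [List.getD_replicate _ (List.mem_range.mp hk)]
  simp

theorem pvEmitMap (f : Nat → List Int) : ∀ (m s : Nat),
    (PySem.List.enumerate ((List.range' s m).map f) ((s : Nat) : Int)).flatMap
        (fun kb => if PySem.Int.mod kb.1 2 == 0 then kb.2 else kb.2.reverse)
      = (List.range' s m).flatMap (fun k => pvPw k (f k)) := by
  intro m
  induction m with
  | zero => intro s; simp [PySem.List.enumerate]
  | succ n ih =>
    intro s
    rw [List.range'_succ, List.map_cons, PySem.List.enumerate_cons, List.flatMap_cons,
      List.flatMap_cons]
    have hcast : ((s : Nat) : Int) + 1 = (((s + 1 : Nat)) : Int) := by push_cast; ring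
    rw [hcast, ih (s + 1)]
    congr 1
    have hm : PySem.Int.mod ((s : Nat) : Int) 2 = (((s % 2 : Nat)) : Int) :=
      PySem.Int.mod_natCast s 2
    by_cases h : s % 2 = 0
    · have : (PySem.Int.mod ((s : Nat) : Int) 2 == 0) = true := by
        rw [hm, h]; rfl
      rw [this, if_pos rfl]
      simp [pvPw, h]
    · have : (PySem.Int.mod ((s : Nat) : Int) 2 == 0) = false := by
        rw [hm]
        simp only [beq_eq_false_iff_ne, ne_eq, Int.natCast_eq_zero]
        omega
      rw [this]
      simp [pvPw, h]

-- ---- Part 4: glue ----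

theorem pvDvdAt_take (P : List Int) (qn k : Nat) (x : Int) (hk : k < (P.take qn).length) :
    pvDvdAt (P.take qn) k x = pvDvdAt P k x := by
  unfold pvDvdAt
  have hk2 : k < P.length := by rw [List.length_take] at hk; omega
  rw [List.getD_eq_getElem _ _ hk, List.getD_eq_getElem _ _ hk2, List.getElem_take]

theorem pvNoHit_take (P : List Int) (qn n : Nat) (x : Int) (hn : n ≤ (P.take qn).length) :
    pvNoHit (P.take qn) 0 n x = pvNoHit P 0 n x := by
  unfold pvNoHit
  rw [Bool.eq_iff_iff, List.all_eq_true, List.all_eq_true]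
  constructor
  · intro hall j hj
    have hjn : j < n := List.mem_range.mp hj
    have h := hall j hj
    simp only at h ⊢
    rwa [pvDvdAt_take P qn (0 + j) x (by omega)] at h
  · intro hall j hj
    have hjn : j < n := List.mem_range.mp hj
    have h := hall j hj
    simp only at h ⊢
    rwa [pvDvdAt_take P qn (0 + j) x (by omega)]

theorem pvHitAt_take (P : List Int) (qn k : Nat) (x : Int) (hk : k < (P.take qn).length) :
    pvHitAt (P.take qn) 0 k x = pvHitAt P 0 k x := by
  unfold pvHitAt
  rw [pvNoHit_take P qn k x (by omega), pvDvdAt_take P qn (0 + k) x (by omega)]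

theorem pvParity (qn : Nat) (u : List Int) :
    (if PySem.Int.mod ((qn : Nat) : Int) 2 == 0 then u.reverse else u) = pvPw (qn + 1) u := by
  have hm : PySem.Int.mod ((qn : Nat) : Int) 2 = ((qn % 2 : Nat) : Int) := by
    exact_mod_cast PySem.Int.mod_natCast qn 2
  by_cases h : qn % 2 = 0
  · have hcond : (PySem.Int.mod ((qn : Nat) : Int) 2 == 0) = true := by
      rw [hm, h]; rfl
    rw [hcond]
    have h1 : ¬ ((qn + 1) % 2 = 0) := by omega
    simp [pvPw, h1]
  · have hcond : (PySem.Int.mod ((qn : Nat) : Int) 2 == 0) = false := by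
      rw [hm]
      simp only [beq_eq_false_iff_ne, ne_eq, Int.natCast_eq_zero]
      omega
    rw [hcond]
    have h1 : (qn + 1) % 2 = 0 := by omega
    simp [pvPw, h1]

theorem pvFlatMapCongr {l : List Nat} {f g : Nat → List Int} (h : ∀ a ∈ l, f a = g a) :
    l.flatMap f = l.flatMap g := by
  induction l with
  | nil => rfl
  | cons a l ih =>
    rw [List.flatMap_cons, List.flatMap_cons, h a (by simp), ih (fun b hb => h b (by simp [hb]))]

theorem pvAlt_spec (number : List Int) (q : Int) (h0 : 0 ≤ q) :
    waiter_alt number q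
      = (List.range' 0 (pvPrime.take q.toNat).length).flatMap
          (fun k => pvPw k (number.filter
             (fun x => pvFirstDiv x (pvPrime.take q.toNat) 0 == some k)))
        ++ pvPw (q.toNat + 1) (number.filter
             (fun x => (pvFirstDiv x (pvPrime.take q.toNat) 0).isNone)) := by
  simp only [waiter_alt]
  rw [PySem.List.slice_to _ h0, pvClassify_spec]
  simp only []
  rw [PySem.List.foldl_append_eq_flatMap
        (fun kb : Int × List Int => if PySem.Int.mod kb.1 2 == 0 then kb.2 else kb.2.reverse),
      List.nil_append]
  have he := pvEmitMap
    (fun k => number.filter (fun x => pvFirstDiv x (pvPrime.take q.toNat) 0 == some k))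
    (pvPrime.take q.toNat).length 0
  simp only [Nat.cast_zero] at he
  rw [List.range_eq_range', he]
  congr 1
  have hq : ((q.toNat : Nat) : Int) = q := Int.toNat_of_nonneg h0
  rw [← hq, pvParity]
  have hmax : (max q 0).toNat = q.toNat := by omega
  simp only [Int.toNat_natCast, hmax]

theorem pvMain (number : List Int) (q : Int) (hpre : Pre_waiter number q) :
    waiter number q = waiter_alt number q := by
  obtain ⟨h0, hcase⟩ := hpre
  have hcond : q.toNat + 0 ≤ pvPrime.length ∨
      ∀ x ∈ number, ∃ k, 0 ≤ k ∧ k < pvPrime.length ∧ pvPrime.getD k 1 ∣ x := by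
    rcases hcase with h | h
    · left; rw [pvPrime_length]; omega
    · right
      intro x hx
      rcases h x hx with ⟨d, hdm, hdmod⟩
      have hdr := PySem.List.mem_pyRange_one.mp hdm
      have hdvd : d ∣ x := (PySem.Int.mod_eq_zero_iff_dvd x d).mp hdmod
      rcases pvSmoothHit hdr.1 hdr.2 hdvd with ⟨k, hk, hkd⟩
      exact ⟨k, Nat.zero_le k, hk, hkd⟩
  have hr := pvRounds_spec pvPrime q.toNat 0 number [] hcond
  unfold waiter
  rw [if_neg (by omega)]
  simp only [hr]
  rw [PySem.List.foldl_append_eq_flatMap (fun bi : List Int => bi.reverse)]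
  simp only [List.nil_append]
  rw [List.flatMap_map, pvAlt_spec number q h0]
  have hA : ∀ j : Nat,
      ((fun j => pvPw (j + 1) (number.filter (pvHitAt pvPrime 0 j))) j).reverse
        = pvPw j (number.filter (pvHitAt pvPrime 0 j)) := by
    intro j
    simp only []
    rw [pvPw_rev2, pvPw_two]
  have hAe : (fun a => ((fun j => pvPw (j + 1) (number.filter (pvHitAt pvPrime 0 j))) a).reverse)
      = (fun j => pvPw j (number.filter (pvHitAt pvPrime 0 j))) := funext hA
  rw [hAe, pvPw_rev2]
  set qn := q.toNat with hqn
  set m := (pvPrime.take qn).length with hmdef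
  have hm : m = min qn pvPrime.length := by rw [hmdef, List.length_take]
  have hmle : m ≤ qn := by omega
  have hsplit : List.range qn = List.range' 0 m ++ List.range' m (qn - m) := by
    rw [List.range_eq_range']
    have h := @List.range'_append 0 m (qn - m) 1
    simp only [Nat.one_mul, Nat.zero_add] at h
    have h2 : m + (qn - m) = qn := by omega
    rw [h2] at h
    exact h.symm
  rw [hsplit, List.flatMap_append]
  have hpiece1 : (List.range' 0 m).flatMap (fun j => pvPw j (number.filter (pvHitAt pvPrime 0 j)))
      = (List.range' 0 m).flatMap
          (fun k => pvPw k (number.filter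
            (fun x => pvFirstDiv x (pvPrime.take qn) 0 == some k))) := by
    apply pvFlatMapCongr
    intro j hj
    have hjm : j < m := by
      have := List.mem_range'_1.mp hj
      omega
    congr 1
    apply List.filter_congr
    intro x _
    rw [Bool.eq_iff_iff, beq_iff_eq]
    rw [pvFirstDiv_some_iff]
    rw [pvHitAt_take pvPrime qn j x (by omega)]
    constructor
    · intro h; exact ⟨by omega, h⟩
    · intro h; exact h.2
  rw [hpiece1]
  by_cases hle : qn ≤ pvPrime.length
  · have hmqn : m = qn := by omega
    have hempty : List.range' m (qn - m) = [] := by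
      rw [List.range'_eq_nil_iff]; omega
    rw [hempty, List.flatMap_nil, List.append_nil]
    congr 2
    apply List.filter_congr
    intro x _
    rw [Bool.eq_iff_iff, Option.isNone_iff_eq_none, pvFirstDiv_none_iff]
    rw [show (pvPrime.take qn).length = m from rfl, pvNoHit_take pvPrime qn m x (by omega), hmqn]
  · -- q.toNat exceeds the prime count: every plate is answered, all remaining pieces are empty
    have hsm : ∀ x ∈ number, ∃ k, 0 ≤ k ∧ k < pvPrime.length ∧ pvPrime.getD k 1 ∣ x := by
      rcases hcond with h | h
      · exfalso; omega
      · exact h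
    have hmlen : m = pvPrime.length := by omega
    have hnof : ∀ (n : Nat), pvPrime.length ≤ n → ∀ x ∈ number, pvNoHit pvPrime 0 n x = false := by
      intro n hn x hx
      rcases hsm x hx with ⟨k, _, hk, hkd⟩
      unfold pvNoHit
      rw [Bool.eq_false_iff]
      intro hall
      have h := List.all_eq_true.mp hall k (List.mem_range.mpr (by omega))
      simp only [Bool.not_eq_eq_eq_not, Bool.not_true] at h
      unfold pvDvdAt at h
      rw [Nat.zero_add, (PySem.Int.mod_eq_zero_iff_dvd x (pvPrime.getD k 1)).mpr hkd] at h
      simp at h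
    have hpiece2 : (List.range' m (qn - m)).flatMap
        (fun j => pvPw j (number.filter (pvHitAt pvPrime 0 j))) = [] := by
      rw [List.flatMap_eq_nil_iff]
      intro j hj
      have hjm : m ≤ j := (List.mem_range'_1.mp hj).1
      rw [List.filter_eq_nil_iff.mpr (by
        intro x hx
        unfold pvHitAt
        rw [hnof j (by omega) x hx, Bool.false_and]
        simp), pvPw_nil]
    rw [hpiece2, List.append_nil]
    have htailA : number.filter (pvNoHit pvPrime 0 qn) = [] := by
      rw [List.filter_eq_nil_iff]
      intro x hx
      rw [hnof qn (by omega) x hx]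
      simp
    have htailB : number.filter (fun x => (pvFirstDiv x (pvPrime.take qn) 0).isNone) = [] := by
      rw [List.filter_eq_nil_iff]
      intro x hx
      simp only [Option.isNone_iff_eq_none, pvFirstDiv_none_iff,
        show (pvPrime.take qn).length = m from rfl]
      rw [pvNoHit_take pvPrime qn m x (by omega), hmlen, hnof pvPrime.length le_rfl x hx]
      simp
    rw [htailA, htailB, pvPw_nil]

-- ===== VERDICT (by name: the statement is the Claim_ definition above) =====

theorem waiter_spec : Claim_equal_waiter := by
  unfold Claim_equal_waiter
  intro number q _ hpre
  unfold Spec_waiter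
  exact pvMain number q hpre
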